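-- pv_equiv track=rewrite | github.com/ggobemiya/PythonCode | codesignal/intro/fileNaming.py | fileNaming
-- ===== SOURCE A (Python) =====
-- def fileNaming(s):
--   for i in range(len(s)):
--     #s[i] 이전까지의 값을 체크해서 중복된 값이 있는지 확인
--     if s[i] in s[:i]:
--       #중복된 값이 있다면 뒤에 (1) 를 붙여줌
--       c = 1
--       #만약 이미 (1)이 뒤에 있다면 c의 값을 더해줌
--       while s[i] + "(" + str(c) + ")" in s[:i]:
--         c += 1
--       #뒤에 (c)를 붙여줌
--       s[i] += "(" + str(c) + ")"
--
--   return s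
-- ===== SOURCE B (Python) =====
-- def fileNaming(s):
--     # Interval-jump scheme: every used name is parsed ONCE into (base, k) when it
--     # enters the used set, recording on base's number line that slot k is taken
--     # (a jump pointer k -> k+1).  A collision is resolved by walking the jump
--     # table from 1 instead of probing candidate strings against the seen names;
--     # after a resolution the pointer at 1 is shortcut to c + 1, so each recorded
--     # slot is walked at most once per base over the whole run.
--     used = set()
--     marks = {}  # base -> {k: jump target}; keys = the taken suffix numbers of base
--     out = []
--     for name in s:
--         if name in used:
--             d = marks.setdefault(name, {})
--             c = 1
--             while c in d:
--                 c = d[c]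
--             new = name + "(" + str(c) + ")"
--             _record(used, marks, new)
--             marks[name][1] = c + 1  # everything below c is known taken
--             out.append(new)
--         else:
--             _record(used, marks, name)
--             out.append(name)
--     return out
--
--
-- def _record(used, marks, name):
--     used.add(name)
--     p = _parse(name)
--     if p is not None:
--         base, k = p
--         marks.setdefault(base, {})[k] = k + 1
--
--
-- def _parse(name):
--     # name == base + "(" + str(k) + ")" with k >= 1 canonical?  Scan the digit
--     # run from the right; reject an empty run, a leading zero, a missing "(".
--     if not name.endswith(")"):
--         return None
--     j = len(name) - 2
--     while j >= 0 and name[j].isdigit():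
--         j -= 1
--     if j < 0 or name[j] != "(" or j == len(name) - 2 or name[j + 1] == "0":
--         return None
--     k = 0
--     for ch in name[j + 1 : len(name) - 1]:  # int() of the digit run
--         k = 10 * k + (ord(ch) - 48)
--     return name[:j], k
-- ===== Notes on version B (the rewrite author's own statement) =====
-- stated objective: faster
-- what changed: A probes candidate strings name(1), name(2), ... against the list prefix s[:i] for every duplicate; B never probes candidates: each used name is parsed once into (base, k), recorded as a jump pointer k -> k+1 on base's number line, and a collision is resolved by walking the jump table from 1 (with a shortcut pointer written back), then B appends to a fresh output list instead of renaming in place.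
import Mathlib
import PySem

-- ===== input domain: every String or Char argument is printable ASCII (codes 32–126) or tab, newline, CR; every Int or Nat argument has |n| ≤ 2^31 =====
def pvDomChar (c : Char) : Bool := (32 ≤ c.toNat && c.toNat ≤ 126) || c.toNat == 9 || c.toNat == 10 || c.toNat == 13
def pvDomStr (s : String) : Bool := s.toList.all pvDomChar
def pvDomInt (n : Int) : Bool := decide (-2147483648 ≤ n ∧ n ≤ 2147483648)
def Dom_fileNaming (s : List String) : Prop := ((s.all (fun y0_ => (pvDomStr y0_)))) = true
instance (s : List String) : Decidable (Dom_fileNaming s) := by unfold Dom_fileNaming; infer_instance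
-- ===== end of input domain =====

-- B replaces A's candidate probing (each duplicate retries name(1), name(2), … against the prefix s[:i])
-- by parsing every used name once into (base, k) and walking a per-base jump table of taken slots
-- (objective: faster). Python A renames its argument list in place and returns it; B builds a fresh
-- list — the theorems are about the return value.

-- ===== PORT A =====
-- the candidate name  nm + "(" + str(c) + ")"  (shared spelling of the string concatenation)
def pvCand (nm : String) (c : Int) : String := nm ++ "(" ++ PySem.Int.toStr c ++ ")"

-- A's `while s[i] + "(" + str(c) + ")" in s[:i]: c += 1`; the fuel only makes it total
-- (pvExistsFree below shows the fuel A's port passes is never exhausted)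
def pvFindFree (p : Int → Bool) : Nat → Int → Int
  | 0, c => c
  | fuel + 1, c => if p c then pvFindFree p fuel (c + 1) else c

-- A's `for i in range(len(s))` with in-place renaming of s[i]: the processed prefix s[:i] is acc
def pvALoop (acc : List String) : List String → List String
  | [] => acc
  | x :: rest =>
    if x ∈ acc then
      pvALoop (acc ++ [pvCand x (pvFindFree (fun c => decide (pvCand x c ∈ acc)) (acc.length + 1) 1)]) rest
    else
      pvALoop (acc ++ [x]) rest

def fileNaming (s : List String) : List String := pvALoop [] s

-- ===== PORT B =====
-- the digit-run fold `k = 10*k + (ord(ch) - 48)` of Source B (exact: ord(ch) = ch.toNat on ASCII)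
def pvDigitVal (ds : List Char) : Int := ds.foldl (fun a c => 10 * a + ((c.toNat : Int) - 48)) 0

-- Source B's `while j >= 0 and name[j].isdigit(): j -= 1`, with j represented as j+1 : Nat
def pvScan (cs : List Char) : Nat → Nat
  | 0 => 0
  | j + 1 => if PySem.Chars.isdigit (cs.getD j ' ') then pvScan cs j else j + 1

-- Source B's `_parse`: name == base + "(" + str(k) + ")" with canonical k ≥ 1?
def pvParse (name : String) : Option (String × Int) :=
  let cs := name.toList
  if PySem.Chars.endswith cs [')'] then
    let j1 := pvScan cs (cs.length - 1)           -- final j + 1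
    if j1 = 0 ∨ cs.getD (j1 - 1) ' ' ≠ '(' ∨ j1 = cs.length - 1 ∨ cs.getD j1 ' ' = '0' then
      none
    else
      -- name[:j]  and the digit-run fold over  name[j+1 : len(name)-1]
      some (String.ofList (cs.take (j1 - 1)), pvDigitVal ((cs.drop j1).take (cs.length - 1 - j1)))
  else none

-- Source B's `_record`: used.add(name); marks.setdefault(base, {})[k] = k + 1 on a successful parse
-- (setdefault + in-place update of the sub-dict = overwrite-insert of the updated sub-dict)
def pvRecord (used : PySem.Set String) (marks : PySem.Dict String (PySem.Dict Int Int)) (name : String) :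
    PySem.Set String × PySem.Dict String (PySem.Dict Int Int) :=
  match pvParse name with
  | some (base, k) =>
      (PySem.Set.add used name,
       marks.insert base ((marks.getD base PySem.Dict.empty).insert k (k + 1)))
  | none => (PySem.Set.add used name, marks)

-- Source B's `while c in d: c = d[c]`; the fuel only makes it total (pvChase_spec: it is never exhausted)
def pvChase (d : PySem.Dict Int Int) : Nat → Int → Int
  | 0, c => c
  | fuel + 1, c =>
    match d.get? c with
    | some v => pvChase d fuel v
    | none => c

def pvBLoop (used : PySem.Set String) (marks : PySem.Dict String (PySem.Dict Int Int))
    (out : List String) : List String → List String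
  | [] => out
  | name :: rest =>
    if PySem.Set.contains used name then
      let d := marks.getD name PySem.Dict.empty                  -- marks.setdefault(name, {})
      let c := pvChase d (d.items.length + 1) 1
      let nw := pvCand name c
      let um := pvRecord used marks nw
      let marks2 := um.2.insert name ((um.2.getD name PySem.Dict.empty).insert 1 (c + 1))  -- marks[name][1] = c+1
      pvBLoop um.1 marks2 (out ++ [nw]) rest
    else
      let um := pvRecord used marks name
      pvBLoop um.1 um.2 (out ++ [name]) rest

def fileNaming_alt (s : List String) : List String :=
  pvBLoop PySem.Set.empty PySem.Dict.empty [] s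

-- ===== PRECONDITION & SPEC =====
def Spec_fileNaming (s : List String) (out : List String) : Prop := out = fileNaming_alt s
instance (s : List String) (out : List String) : Decidable (Spec_fileNaming s out) := by unfold Spec_fileNaming; infer_instance

-- ===== CLAIM (what is proved, stated in full; the proofs are below) =====
def Claim_equal_fileNaming : Prop := ∀ (s : List String), Dom_fileNaming s → Spec_fileNaming s (fileNaming s)

-- ===== LEMMAS AND PROOFS =====

-- ---- digit facts ----
lemma pvIsdigit_digitChar {m : Nat} (hm : m < 10) : PySem.Chars.isdigit (Nat.digitChar m) = true := by
  interval_cases m <;> decide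

lemma pvToNat_digitChar {m : Nat} (hm : m < 10) : (Nat.digitChar m).toNat = m + 48 := by
  interval_cases m <;> decide

lemma pvIsdigit_bounds {c : Char} (h : PySem.Chars.isdigit c = true) :
    48 ≤ c.toNat ∧ c.toNat ≤ 57 := by
  simp only [PySem.Chars.isdigit, Bool.and_eq_true, decide_eq_true_eq, Char.le_def,
    UInt32.le_iff_toNat_le] at h
  exact ⟨h.1, h.2⟩

lemma pvDigitChar_of_isdigit {c : Char} (h : PySem.Chars.isdigit c = true) :
    c.toNat - 48 < 10 ∧ Nat.digitChar (c.toNat - 48) = c := by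
  obtain ⟨h1, h2⟩ := pvIsdigit_bounds h
  refine ⟨by omega, ?_⟩
  have htn : (Nat.digitChar (c.toNat - 48)).toNat = (c.toNat - 48) + 48 :=
    pvToNat_digitChar (by omega)
  have : (Nat.digitChar (c.toNat - 48)).toNat = c.toNat := by omega
  exact Char.ext (UInt32.toNat_inj.mp this)

lemma pvDigitChar_ne_zero {m : Nat} (h1 : 1 ≤ m) (hm : m < 10) : Nat.digitChar m ≠ '0' := by
  interval_cases m <;> decide

lemma pvMem_toDigits_isdigit : ∀ n : Nat, ∀ c ∈ Nat.toDigits 10 n, PySem.Chars.isdigit c = true := by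
  intro n
  induction n using Nat.strong_induction_on with
  | _ n ih =>
    intro c hc
    rw [Nat.toDigits_eq_if (by norm_num)] at hc
    split_ifs at hc with hn
    · simp only [List.mem_singleton] at hc
      exact hc ▸ pvIsdigit_digitChar hn
    · rcases List.mem_append.mp hc with h1 | h1
      · exact ih (n / 10) (Nat.div_lt_self (by omega) (by norm_num)) c h1
      · simp only [List.mem_singleton] at h1
        exact h1 ▸ pvIsdigit_digitChar (Nat.mod_lt _ (by norm_num))

lemma pvHead_toDigits_ne_zero : ∀ n : Nat, 1 ≤ n → (Nat.toDigits 10 n).getD 0 ' ' ≠ '0' := by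
  intro n
  induction n using Nat.strong_induction_on with
  | _ n ih =>
    intro hn1
    rw [Nat.toDigits_eq_if (by norm_num)]
    split_ifs with hn
    · simpa using pvDigitChar_ne_zero hn1 hn
    · have hpos : 0 < (Nat.toDigits 10 (n / 10)).length := Nat.length_toDigits_pos
      rw [List.getD_append _ _ _ 0 hpos]
      exact ih (n / 10) (Nat.div_lt_self (by omega) (by norm_num)) (by omega)

lemma pvDigitVal_append (ds : List Char) (c : Char) :
    pvDigitVal (ds ++ [c]) = 10 * pvDigitVal ds + ((c.toNat : Int) - 48) := by
  simp [pvDigitVal, List.foldl_append]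

lemma pvDigitVal_toDigits : ∀ n : Nat, pvDigitVal (Nat.toDigits 10 n) = n := by
  intro n
  induction n using Nat.strong_induction_on with
  | _ n ih =>
    rw [Nat.toDigits_eq_if (by norm_num)]
    split_ifs with hn
    · simp only [pvDigitVal, List.foldl_cons, List.foldl_nil]
      rw [pvToNat_digitChar hn]
      push_cast
      ring
    · rw [pvDigitVal_append, ih (n / 10) (Nat.div_lt_self (by omega) (by norm_num)),
        pvToNat_digitChar (Nat.mod_lt _ (by norm_num))]
      push_cast
      omega

-- canonical digit runs reconstruct: the fold's value turned back into str(k) equals the run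
lemma pvToDigits_digitVal : ∀ ds : List Char, ds ≠ [] →
    (∀ c ∈ ds, PySem.Chars.isdigit c = true) → ds.getD 0 ' ' ≠ '0' →
    1 ≤ pvDigitVal ds ∧ Nat.toDigits 10 (pvDigitVal ds).toNat = ds := by
  intro ds
  induction ds using List.reverseRecOn with
  | nil => intro h; exact absurd rfl h
  | append_singleton ds c ih =>
    intro _ hdig h0
    have hc : PySem.Chars.isdigit c = true := hdig c (by simp)
    obtain ⟨hb1, hb2⟩ := pvIsdigit_bounds hc
    obtain ⟨hm, hdc⟩ := pvDigitChar_of_isdigit hc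
    rcases eq_or_ne ds [] with rfl | hne
    · have h0' : c ≠ '0' := by simpa using h0
      have hm1 : 1 ≤ c.toNat - 48 := by
        by_contra hlt
        have hz : c.toNat - 48 = 0 := by omega
        rw [hz] at hdc
        exact h0' (by rw [← hdc]; rfl)
      have hv : pvDigitVal ([] ++ [c]) = ((c.toNat - 48 : Nat) : Int) := by
        simp only [pvDigitVal, List.nil_append, List.foldl_cons, List.foldl_nil]
        omega
      refine ⟨by rw [hv]; exact_mod_cast hm1, ?_⟩
      rw [hv, Int.toNat_natCast, Nat.toDigits_eq_if (by norm_num), if_pos hm, hdc]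
      simp
    · have hdig' : ∀ x ∈ ds, PySem.Chars.isdigit x = true := fun x hx => hdig x (by simp [hx])
      have hlen : 0 < ds.length := List.length_pos_iff.mpr hne
      have h0' : ds.getD 0 ' ' ≠ '0' := by
        rwa [List.getD_append _ _ _ 0 hlen] at h0
      obtain ⟨hv1, hrec⟩ := ih hne hdig' h0'
      have hval : pvDigitVal (ds ++ [c]) = 10 * pvDigitVal ds + ((c.toNat : Int) - 48) :=
        pvDigitVal_append ds c
      refine ⟨by rw [hval]; omega, ?_⟩
      rw [hval]
      have htn : (10 * pvDigitVal ds + ((c.toNat : Int) - 48)).toNat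
          = 10 * (pvDigitVal ds).toNat + (c.toNat - 48) := by omega
      rw [htn, Nat.toDigits_eq_if (by norm_num), if_neg (by omega)]
      have hdiv : (10 * (pvDigitVal ds).toNat + (c.toNat - 48)) / 10 = (pvDigitVal ds).toNat := by
        omega
      have hmod : (10 * (pvDigitVal ds).toNat + (c.toNat - 48)) % 10 = c.toNat - 48 := by
        omega
      rw [hdiv, hmod, hrec, hdc]

-- ---- parse facts ----
lemma pvToList_cand (b : String) (k : Int) (hk : 1 ≤ k) :
    (pvCand b k).toList = b.toList ++ '(' :: Nat.toDigits 10 k.toNat ++ [')'] := by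
  have hnl : ¬ k < 0 := by omega
  have h1 : ("(" : String).toList = ['('] := rfl
  have h2 : (")" : String).toList = [')'] := rfl
  simp [pvCand, String.toList_append, h1, h2, PySem.Int.toList_toStr, PySem.Int.toChars, hnl]

lemma pvScan_getD_digit {cs : List Char} {j : Nat}
    (h : PySem.Chars.isdigit (cs.getD j ' ') = true) : pvScan cs (j + 1) = pvScan cs j := by
  simp only [pvScan]
  rw [h]
  simp

lemma pvScan_getD_nondigit {cs : List Char} {j : Nat}
    (h : PySem.Chars.isdigit (cs.getD j ' ') = false) : pvScan cs (j + 1) = j + 1 := by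
  simp only [pvScan]
  rw [h]
  simp

lemma pvScan_le (cs : List Char) : ∀ j, pvScan cs j ≤ j := by
  intro j
  induction j with
  | zero => simp [pvScan]
  | succ j ih =>
    cases hx : PySem.Chars.isdigit (cs.getD j ' ') with
    | false => rw [pvScan_getD_nondigit hx]
    | true => rw [pvScan_getD_digit hx]; omega

lemma pvScan_digits (cs : List Char) :
    ∀ j t, pvScan cs j ≤ t → t < j → PySem.Chars.isdigit (cs.getD t ' ') = true := by
  intro j
  induction j with
  | zero => intro t h1 h2; omega
  | succ j ih =>
    intro t h1 h2
    cases hx : PySem.Chars.isdigit (cs.getD j ' ') with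
    | false => rw [pvScan_getD_nondigit hx] at h1; omega
    | true =>
      rw [pvScan_getD_digit hx] at h1
      rcases Nat.lt_or_ge t j with h | h
      · exact ih t h1 h
      · have ht : t = j := by omega
        exact ht ▸ hx

lemma pvScan_prefix (cs : List Char) (b0 : Nat)
    (h0 : PySem.Chars.isdigit (cs.getD b0 ' ') = false) :
    ∀ t, (∀ i, b0 < i → i < b0 + 1 + t → PySem.Chars.isdigit (cs.getD i ' ') = true) →
      pvScan cs (b0 + 1 + t) = b0 + 1 := by
  intro t
  induction t with
  | zero => intro _; exact pvScan_getD_nondigit h0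
  | succ t ih =>
    intro hdig
    have he : b0 + 1 + (t + 1) = (b0 + 1 + t) + 1 := by omega
    rw [he, pvScan_getD_digit (hdig _ (by omega) (by omega))]
    exact ih (fun i hi1 hi2 => hdig i hi1 (by omega))

lemma pvGetD_off (L R : List Char) (t : Nat) : (L ++ R).getD (L.length + t) ' ' = R.getD t ' ' := by
  induction L with
  | nil => simp
  | cons a L ih =>
    have he : (a :: L).length + t = (L.length + t) + 1 := by simp; omega
    rw [List.cons_append, he, List.getD_cons_succ, ih]

lemma pvTake_len (L R : List Char) : (L ++ R).take L.length = L := by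
  induction L with
  | nil => simp
  | cons a L ih => simpa using ih

lemma pvDrop_len (L R : List Char) : (L ++ R).drop L.length = R := by
  induction L with
  | nil => simp
  | cons a L ih => simpa using ih

lemma pvParse_cand (b : String) (k : Int) (hk : 1 ≤ k) : pvParse (pvCand b k) = some (b, k) := by
  have hk0 : 1 ≤ k.toNat := by omega
  have hcs : (pvCand b k).toList
      = b.toList ++ '(' :: Nat.toDigits 10 k.toNat ++ [')'] := pvToList_cand b k hk
  set D := Nat.toDigits 10 k.toNat with hD
  set B := b.toList with hB
  set cs := (pvCand b k).toList with hcsd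
  have hDlen : 0 < D.length := Nat.length_toDigits_pos
  have hcs2 : cs = (B ++ ['(']) ++ (D ++ [')']) := by rw [hcs]; simp
  have hL : (B ++ ['(']).length = B.length + 1 := by simp
  have hlen : cs.length = B.length + 1 + D.length + 1 := by
    rw [hcs2]
    simp
    omega
  have hpar : cs.getD B.length ' ' = '(' := by
    have h0 := pvGetD_off B ('(' :: (D ++ [')'])) 0
    rw [hcs]
    simpa using h0
  have hdigi : ∀ t, t < D.length →
      PySem.Chars.isdigit (cs.getD (B.length + 1 + t) ' ') = true := by
    intro t ht
    have h1 : cs.getD (B.length + 1 + t) ' ' = (D ++ [')']).getD t ' ' := by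
      rw [hcs2, ← hL]
      exact pvGetD_off (B ++ ['(']) (D ++ [')']) t
    rw [h1, List.getD_append _ _ _ t ht, List.getD_eq_getElem _ _ ht]
    exact pvMem_toDigits_isdigit k.toNat _ (List.getElem_mem ht)
  have hscan : pvScan cs (B.length + 1 + D.length) = B.length + 1 := by
    refine pvScan_prefix cs B.length ?_ D.length ?_
    · rw [hpar]
      decide
    · intro i hi1 hi2
      have he : i = B.length + 1 + (i - B.length - 1) := by omega
      rw [he]
      exact hdigi _ (by omega)
  have hends : PySem.Chars.endswith cs [')'] = true := by
    rw [PySem.Chars.endswith_iff, hcs2]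
    exact ⟨(B ++ ['(']) ++ D, by simp⟩
  have hzero : cs.getD (B.length + 1) ' ' ≠ '0' := by
    have h1 : cs.getD (B.length + 1) ' ' = (D ++ [')']).getD 0 ' ' := by
      rw [hcs2]
      have he : B.length + 1 = (B ++ ['(']).length + 0 := by rw [hL]
      rw [he]
      exact pvGetD_off (B ++ ['(']) (D ++ [')']) 0
    rw [h1, List.getD_append _ _ _ 0 hDlen]
    exact pvHead_toDigits_ne_zero k.toNat hk0
  have hn1 : cs.length - 1 = B.length + 1 + D.length := by omega
  simp only [pvParse]
  rw [← hcsd, hn1, hscan, if_pos hends]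
  rw [if_neg (by
    push_neg
    refine ⟨by omega, ?_, by omega, hzero⟩
    have he : B.length + 1 - 1 = B.length := by omega
    rw [he, hpar])]
  have hcs3 : cs = B ++ ('(' :: (D ++ [')'])) := by rw [hcs2]; simp
  have htake : cs.take (B.length + 1 - 1) = B := by
    have he : B.length + 1 - 1 = B.length := by omega
    rw [he, hcs3]
    exact pvTake_len B ('(' :: (D ++ [')']))
  have hdrop : cs.drop (B.length + 1) = D ++ [')'] := by
    rw [hcs2, ← hL]
    exact pvDrop_len (B ++ ['(']) (D ++ [')'])
  have hmid : (cs.drop (B.length + 1)).take (B.length + 1 + D.length - (B.length + 1)) = D := by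
    rw [hdrop]
    have he : B.length + 1 + D.length - (B.length + 1) = D.length := by omega
    rw [he]
    exact pvTake_len D [')']
  rw [htake, hmid]
  have hval : pvDigitVal D = k := by
    rw [hD, pvDigitVal_toDigits]
    omega
  rw [hval, hB]
  simp

lemma pvParse_sound {nm b : String} {k : Int} (h : pvParse nm = some (b, k)) :
    1 ≤ k ∧ nm = pvCand b k := by
  simp only [pvParse] at h
  set cs := nm.toList with hcsd
  cases hend : PySem.Chars.endswith cs [')'] with
  | false => rw [if_neg (by simp [hend])] at h; cases h
  | true =>
    rw [if_pos hend] at h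
    set j1 := pvScan cs (cs.length - 1) with hj1
    by_cases hcond : (j1 = 0 ∨ cs.getD (j1 - 1) ' ' ≠ '(' ∨ j1 = cs.length - 1 ∨ cs.getD j1 ' ' = '0')
    · rw [if_pos hcond] at h
      cases h
    · rw [if_neg hcond] at h
      push_neg at hcond
      obtain ⟨h1, h2, h3, h4⟩ := hcond
      obtain ⟨pre, hpre⟩ : ∃ pre, pre ++ [')'] = cs :=
        (PySem.Chars.endswith_iff cs [')']).mp hend
      have hlen : cs.length = pre.length + 1 := by rw [← hpre]; simp
      have hj1le : j1 ≤ pre.length := by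
        have := pvScan_le cs (cs.length - 1)
        omega
      have hj1lt : j1 < pre.length := by
        rcases Nat.lt_or_ge j1 pre.length with hh | hh
        · exact hh
        · exact absurd (by omega : j1 = cs.length - 1) h3
      have hj11 : 1 ≤ j1 := by omega
      have hmid : (cs.drop j1).take (cs.length - 1 - j1) = pre.drop j1 := by
        rw [← hpre, List.drop_append_of_le_length (by omega)]
        have he : (pre ++ [')']).length - 1 - j1 = (pre.drop j1).length := by
          simp only [List.length_append, List.length_cons, List.length_nil, List.length_drop]
          omega
        rw [he]
        exact pvTake_len (pre.drop j1) [')']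
      have hgetpre : ∀ t, t < pre.length → cs.getD t ' ' = pre.getD t ' ' := by
        intro t ht
        rw [← hpre, List.getD_append _ _ _ t ht]
      have hdigmid : ∀ c ∈ pre.drop j1, PySem.Chars.isdigit c = true := by
        intro c hcmem
        obtain ⟨i, hi, hig⟩ := List.mem_iff_getElem.mp hcmem
        have hilen : j1 + i < pre.length := by
          have h5 := hi
          simp only [List.length_drop] at h5
          omega
        have hget : cs.getD (j1 + i) ' ' = c := by
          rw [hgetpre _ hilen, List.getD_eq_getElem _ _ hilen, ← List.getElem_drop, hig]
          exact hi
        have h6 := pvScan_digits cs (cs.length - 1) (j1 + i) (by rw [← hj1]; omega) (by omega)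
        rwa [hget] at h6
      have hmidne : pre.drop j1 ≠ [] := by
        simp only [ne_eq, List.drop_eq_nil_iff]
        omega
      have hmid0 : (pre.drop j1).getD 0 ' ' ≠ '0' := by
        have hd : pre.drop j1 = pre[j1] :: pre.drop (j1 + 1) := List.drop_eq_getElem_cons hj1lt
        rw [hd, List.getD_cons_zero]
        have h7 : cs.getD j1 ' ' = pre[j1] := by
          rw [hgetpre _ hj1lt, List.getD_eq_getElem _ _ hj1lt]
        rw [← h7]
        exact h4
      obtain ⟨hk1, hrec⟩ := pvToDigits_digitVal (pre.drop j1) hmidne hdigmid hmid0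
      have hbv : b = String.ofList (cs.take (j1 - 1))
          ∧ k = pvDigitVal ((cs.drop j1).take (cs.length - 1 - j1)) := by
        have h8 := h
        simp only [Option.some.injEq, Prod.mk.injEq] at h8
        exact ⟨h8.1.symm, h8.2.symm⟩
      obtain ⟨hbdef, hkdef⟩ := hbv
      rw [hmid] at hkdef
      refine ⟨hkdef ▸ hk1, ?_⟩
      have hbl : b.toList = cs.take (j1 - 1) := by rw [hbdef]; simp
      have hparen : pre[j1 - 1] = '(' := by
        have hp1 : j1 - 1 < pre.length := by omega
        have h9 : cs.getD (j1 - 1) ' ' = pre[j1 - 1] := by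
          rw [hgetpre _ hp1, List.getD_eq_getElem _ _ hp1]
        rw [← h9]
        exact h2
      have hsplit : pre = pre.take (j1 - 1) ++ '(' :: pre.drop j1 := by
        have hp1 : j1 - 1 < pre.length := by omega
        have hd : pre.drop (j1 - 1) = pre[j1 - 1] :: pre.drop (j1 - 1 + 1) :=
          List.drop_eq_getElem_cons hp1
        have he : j1 - 1 + 1 = j1 := by omega
        rw [he, hparen] at hd
        conv_lhs => rw [← List.take_append_drop (j1 - 1) pre]
        rw [hd]
      have htakepre : cs.take (j1 - 1) = pre.take (j1 - 1) := by
        rw [← hpre, List.take_append_of_le_length (by omega)]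
      apply String.toList_inj.mp
      rw [pvToList_cand b k (hkdef ▸ hk1), hbl, htakepre, ← hcsd, ← hpre]
      rw [hkdef, hrec]
      all_goals conv_lhs => rw [hsplit]

lemma pvCand_inj {b b' : String} {k k' : Int} (hk : 1 ≤ k) (hk' : 1 ≤ k')
    (h : pvCand b k = pvCand b' k') : b = b' ∧ k = k' := by
  have h1 := pvParse_cand b k hk
  have h2 := pvParse_cand b' k' hk'
  rw [h, h2] at h1
  simp only [Option.some.injEq, Prod.mk.injEq] at h1
  exact ⟨h1.1.symm, h1.2.symm⟩

-- ---- A-side loop facts ----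
lemma pvFindFree_correct (p : Int → Bool) :
    ∀ (fuel : Nat) (c : Int), (∃ k : Nat, k < fuel ∧ p (c + k) = false) →
      p (pvFindFree p fuel c) = false ∧ c ≤ pvFindFree p fuel c ∧
        ∀ d, c ≤ d → d < pvFindFree p fuel c → p d = true := by
  intro fuel
  induction fuel with
  | zero => rintro c ⟨k, hk, _⟩; omega
  | succ f ihf =>
    rintro c ⟨k, hk, hpk⟩
    by_cases hc : p c = true
    · have hk0 : k ≠ 0 := by
        intro e
        subst e
        simp only [Nat.cast_zero, add_zero] at hpk
        rw [hc] at hpk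
        cases hpk
      have hrec := ihf (c + 1) ⟨k - 1, by omega, by
        have he : c + 1 + ((k - 1 : Nat) : Int) = c + (k : Int) := by omega
        rw [he]; exact hpk⟩
      have heq : pvFindFree p (f + 1) c = pvFindFree p f (c + 1) := by
        simp [pvFindFree, hc]
      rw [heq]
      refine ⟨hrec.1, by have := hrec.2.1; omega, ?_⟩
      intro d hcd hdlt
      rcases eq_or_lt_of_le hcd with he | hlt
      · exact he ▸ hc
      · exact hrec.2.2 d (by omega) hdlt
    · have hb : p c = false := by revert hc; cases p c <;> simp
      have heq : pvFindFree p (f + 1) c = c := by simp [pvFindFree, hb]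
      rw [heq]
      exact ⟨hb, le_refl _, fun d hd1 hd2 => absurd hd1 (by omega)⟩

lemma pvExistsFree (nm : String) (acc : List String) :
    ∃ k : Nat, k < acc.length + 1 ∧ decide (pvCand nm (1 + k) ∈ acc) = false := by
  by_contra hcon
  push_neg at hcon
  have hmem : ∀ k : Nat, k < acc.length + 1 → pvCand nm (1 + k) ∈ acc := by
    intro k hk
    cases hdec : decide (pvCand nm (1 + k) ∈ acc) with
    | false => exact absurd hdec (hcon k hk)
    | true => exact of_decide_eq_true hdec
  have hnd : ((List.range (acc.length + 1)).map (fun k : Nat => pvCand nm (1 + k))).Nodup := by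
    refine List.Nodup.map ?_ List.nodup_range
    intro a b hab
    have := (pvCand_inj (by omega) (by omega) hab).2
    omega
  have hsub : ((List.range (acc.length + 1)).map (fun k : Nat => pvCand nm (1 + k))) ⊆ acc := by
    intro y hy
    simp only [List.mem_map, List.mem_range] at hy
    obtain ⟨k, hk, rfl⟩ := hy
    exact hmem k hk
  have h1 := List.toFinset_card_of_nodup hnd
  have h2 : ((List.range (acc.length + 1)).map (fun k : Nat => pvCand nm (1 + k))).toFinset
      ⊆ acc.toFinset := by
    intro y hy
    rw [List.mem_toFinset] at hy ⊢
    exact hsub hy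
  have h3 := Finset.card_le_card h2
  have h4 := acc.toFinset_card_le
  simp only [List.length_map, List.length_range] at h1
  omega

-- ---- chase facts ----
lemma pvChase_spec (d : PySem.Dict Int Int)
    (hC : ∀ k v, d.get? k = some v → k < v ∧ ∀ j, k ≤ j → j < v → d.contains j = true) :
    ∀ (fuel : Nat) (c : Int),
      ((d.items.map (·.1)).toFinset.filter (fun k => c ≤ k)).card < fuel →
      c ≤ pvChase d fuel c ∧ d.contains (pvChase d fuel c) = false ∧
        ∀ j, c ≤ j → j < pvChase d fuel c → d.contains j = true := by
  intro fuel
  induction fuel with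
  | zero => intro c hc; omega
  | succ f ih =>
    intro c hc
    cases hg : d.get? c with
    | none =>
      have heq : pvChase d (f + 1) c = c := by simp [pvChase, hg]
      rw [heq]
      refine ⟨le_refl _, ?_, fun j hj1 hj2 => absurd hj1 (by omega)⟩
      rw [PySem.Dict.contains_eq_isSome_get?, hg]
      rfl
    | some v =>
      obtain ⟨hcv, hall⟩ := hC c v hg
      have hcmem : c ∈ (d.items.map (·.1)).toFinset := by
        rw [List.mem_toFinset]
        obtain ⟨p, hfind, hp2⟩ : ∃ p, List.find? (fun p => p.1 == c) d.items = some p ∧ p.2 = v := by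
          simpa [PySem.Dict.get?, Option.map_eq_some_iff] using hg
        have hpm := List.mem_of_find?_eq_some hfind
        have hpe : p.1 = c := by
          have := List.find?_some hfind
          simpa using this
        rw [List.mem_map]
        exact ⟨p, hpm, hpe⟩
      have hsub : ((d.items.map (·.1)).toFinset.filter (fun k => v ≤ k))
          ⊆ ((d.items.map (·.1)).toFinset.filter (fun k => c ≤ k)).erase c := by
        intro x hx
        simp only [Finset.mem_filter, Finset.mem_erase] at hx ⊢
        exact ⟨by omega, hx.1, by omega⟩
      have hcin : c ∈ (d.items.map (·.1)).toFinset.filter (fun k => c ≤ k) :=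
        Finset.mem_filter.mpr ⟨hcmem, le_refl c⟩
      have hcard : ((d.items.map (·.1)).toFinset.filter (fun k => v ≤ k)).card
          < ((d.items.map (·.1)).toFinset.filter (fun k => c ≤ k)).card :=
        lt_of_le_of_lt (Finset.card_le_card hsub) (Finset.card_erase_lt_of_mem hcin)
      have hrec := ih v (by omega)
      have heq : pvChase d (f + 1) c = pvChase d f v := by simp [pvChase, hg]
      rw [heq]
      refine ⟨by have := hrec.1; omega, hrec.2.1, ?_⟩
      intro j hj1 hj2
      by_cases hjv : j < v
      · exact hall j hj1 hjv
      · exact hrec.2.2 j (by omega) hj2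

-- ---- the invariant tying B's state to A's processed prefix ----
def pvINV (acc : List String) (used : PySem.Set String)
    (marks : PySem.Dict String (PySem.Dict Int Int)) : Prop :=
  (∀ nm, PySem.Set.contains used nm = true ↔ nm ∈ acc) ∧
  (∀ b k, (marks.getD b PySem.Dict.empty).contains k = true ↔ (1 ≤ k ∧ pvCand b k ∈ acc)) ∧
  (∀ b k v, (marks.getD b PySem.Dict.empty).get? k = some v →
    k < v ∧ ∀ j, k ≤ j → j < v → (marks.getD b PySem.Dict.empty).contains j = true)

lemma pvINV_record (acc : List String) (used : PySem.Set String)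
    (marks : PySem.Dict String (PySem.Dict Int Int)) (nm : String)
    (h : pvINV acc used marks) :
    pvINV (acc ++ [nm]) (pvRecord used marks nm).1 (pvRecord used marks nm).2 := by
  obtain ⟨hU, hM, hCc⟩ := h
  have hUadd : ∀ x, PySem.Set.contains (PySem.Set.add used nm) x = true ↔ x ∈ acc ++ [nm] := by
    intro x
    rw [PySem.Set.contains_iff, List.mem_append, List.mem_singleton, ← hU x,
      PySem.Set.contains_iff]
    unfold PySem.Set.add
    split_ifs with hcy
    · constructor
      · exact Or.inl
      · rintro (hh | rfl)
        · exact hh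
        · exact (PySem.Set.contains_iff used x).mp hcy
    · rw [List.mem_append, List.mem_singleton]
  cases hp : pvParse nm with
  | none =>
    have hne : ∀ (b : String) (k : Int), 1 ≤ k → pvCand b k ≠ nm := by
      intro b k hk he
      rw [← he, pvParse_cand b k hk] at hp
      cases hp
    refine ⟨?_, ?_, ?_⟩ <;> simp only [pvRecord, hp]
    · exact hUadd
    · intro b k
      rw [hM b k]
      constructor
      · exact fun ⟨ha, hb⟩ => ⟨ha, List.mem_append_left _ hb⟩
      · rintro ⟨ha, hb⟩
        rcases List.mem_append.mp hb with hb2 | hb2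
        · exact ⟨ha, hb2⟩
        · exact absurd (List.mem_singleton.mp hb2) (hne b k ha)
    · exact hCc
  | some p =>
    obtain ⟨b0, k0⟩ := p
    obtain ⟨hk0, hnm⟩ := pvParse_sound hp
    refine ⟨?_, ?_, ?_⟩ <;> simp only [pvRecord, hp]
    · exact hUadd
    · intro b k
      by_cases hb : b = b0
      · rw [hb, PySem.Dict.getD_insert_self, PySem.Dict.contains_insert, Bool.or_eq_true,
          beq_iff_eq, hM b0 k]
        constructor
        · rintro (rfl | ⟨ha, hb2⟩)
          · exact ⟨hk0, List.mem_append_right _ (List.mem_singleton.mpr hnm.symm)⟩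
          · exact ⟨ha, List.mem_append_left _ hb2⟩
        · rintro ⟨ha, hb2⟩
          rcases List.mem_append.mp hb2 with hb3 | hb3
          · exact Or.inr ⟨ha, hb3⟩
          · left
            have := List.mem_singleton.mp hb3
            rw [hnm] at this
            exact (pvCand_inj ha hk0 this).2
      · rw [PySem.Dict.getD_insert_of_ne _ _ _ hb, hM b k]
        constructor
        · exact fun ⟨ha, hb2⟩ => ⟨ha, List.mem_append_left _ hb2⟩
        · rintro ⟨ha, hb2⟩
          rcases List.mem_append.mp hb2 with hb3 | hb3
          · exact ⟨ha, hb3⟩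
          · have := List.mem_singleton.mp hb3
            rw [hnm] at this
            exact absurd (pvCand_inj ha hk0 this).1 hb
    · intro b k v
      by_cases hb : b = b0
      · rw [hb, PySem.Dict.getD_insert_self]
        by_cases hkk : k = k0
        · rw [hkk, PySem.Dict.get?_insert_self]
          intro hv
          have hveq : v = k0 + 1 := by simpa using hv.symm
          rw [hveq]
          refine ⟨by omega, ?_⟩
          intro j hj1 hj2
          have hjk : j = k0 := by omega
          rw [hjk, PySem.Dict.contains_insert]
          simp
        · rw [PySem.Dict.get?_insert_of_ne _ _ hkk]
          intro hv
          obtain ⟨ha, hb2⟩ := hCc b0 k v hv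
          refine ⟨ha, ?_⟩
          intro j hj1 hj2
          rw [PySem.Dict.contains_insert, Bool.or_eq_true]
          exact Or.inr (hb2 j hj1 hj2)
      · rw [PySem.Dict.getD_insert_of_ne _ _ _ hb]
        exact hCc b k v

lemma pvLoop_eq : ∀ (rest acc : List String) (used : PySem.Set String)
    (marks : PySem.Dict String (PySem.Dict Int Int)),
    pvINV acc used marks → pvBLoop used marks acc rest = pvALoop acc rest := by
  intro rest
  induction rest with
  | nil => intro acc used marks _; rfl
  | cons x rest ih =>
    intro acc used marks hinv
    obtain ⟨hU, hM, hCc⟩ := hinv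
    by_cases hx : x ∈ acc
    · have hcont : PySem.Set.contains used x = true := (hU x).mpr hx
      set dd := marks.getD x PySem.Dict.empty with hdd
      have hfuel : ((dd.items.map (·.1)).toFinset.filter (fun k => (1 : Int) ≤ k)).card
          < dd.items.length + 1 := by
        have ha := Finset.card_filter_le (dd.items.map (·.1)).toFinset (fun k => (1 : Int) ≤ k)
        have hb := (dd.items.map (·.1)).toFinset_card_le
        have hcl : (dd.items.map (·.1)).length = dd.items.length := List.length_map _
        omega
      obtain ⟨hc1, hcfree, hcall⟩ := pvChase_spec dd (hCc x) (dd.items.length + 1) 1 hfuel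
      set c := pvChase dd (dd.items.length + 1) 1 with hcdef
      have hfree : pvCand x c ∉ acc := by
        intro hmem
        have := (hM x c).mpr ⟨hc1, hmem⟩
        rw [hcfree] at this
        cases this
      have hbelow : ∀ j, 1 ≤ j → j < c → pvCand x j ∈ acc :=
        fun j h1 h2 => ((hM x j).mp (hcall j h1 h2)).2
      obtain ⟨ka, hka, hpa⟩ := pvExistsFree x acc
      have HA := pvFindFree_correct (fun c => decide (pvCand x c ∈ acc)) (acc.length + 1) 1
        ⟨ka, hka, hpa⟩
      set a := pvFindFree (fun c => decide (pvCand x c ∈ acc)) (acc.length + 1) 1 with hadef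
      have hA1 : decide (pvCand x a ∈ acc) = false := HA.1
      have hac : a = c := by
        rcases lt_trichotomy a c with hlt | he | hgt
        · exact absurd (decide_eq_true (hbelow a HA.2.1 hlt)) (by simp [hA1])
        · exact he
        · exact absurd (of_decide_eq_true (HA.2.2 c hc1 hgt)) hfree
      have hstep : pvBLoop used marks acc (x :: rest)
          = pvBLoop (pvRecord used marks (pvCand x c)).1
              ((pvRecord used marks (pvCand x c)).2.insert x
                (((pvRecord used marks (pvCand x c)).2.getD x PySem.Dict.empty).insert 1 (c + 1)))
              (acc ++ [pvCand x c]) rest := by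
        simp only [pvBLoop]
        rw [if_pos hcont]
      have hstepA : pvALoop acc (x :: rest) = pvALoop (acc ++ [pvCand x a]) rest := by
        simp only [pvALoop]
        rw [if_pos hx]
      rw [hstep, hstepA, hac]
      have hrec := pvINV_record acc used marks (pvCand x c) ⟨hU, hM, hCc⟩
      obtain ⟨hU', hM', hCc'⟩ := hrec
      have hpc : pvParse (pvCand x c) = some (x, c) := pvParse_cand x c hc1
      have hm2 : (pvRecord used marks (pvCand x c)).2 = marks.insert x (dd.insert c (c + 1)) := by
        simp only [pvRecord, hpc, hdd]
      have hsubx : ((pvRecord used marks (pvCand x c)).2.getD x PySem.Dict.empty)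
          = dd.insert c (c + 1) := by
        rw [hm2, PySem.Dict.getD_insert_self]
      apply ih
      refine ⟨hU', ?_, ?_⟩
      · intro b k
        by_cases hb : b = x
        · rw [hb, PySem.Dict.getD_insert_self, hsubx, PySem.Dict.contains_insert, Bool.or_eq_true,
            beq_iff_eq]
          have hMx : (dd.insert c (c + 1)).contains k = true
              ↔ (1 ≤ k ∧ pvCand x k ∈ acc ++ [pvCand x c]) := by
            have := hM' x k
            rwa [hm2, PySem.Dict.getD_insert_self] at this
          constructor
          · rintro (rfl | hk)
            · refine ⟨le_refl _, ?_⟩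
              rcases eq_or_lt_of_le hc1 with hce | hcg
              · rw [← hce]
                simp
              · exact List.mem_append_left _ (hbelow 1 (le_refl _) hcg)
            · exact hMx.mp hk
          · intro hk
            exact Or.inr (hMx.mpr hk)
        · rw [PySem.Dict.getD_insert_of_ne _ _ _ hb]
          exact hM' b k
      · intro b k v
        by_cases hb : b = x
        · rw [hb, PySem.Dict.getD_insert_self, hsubx]
          intro hkv
          have hconts : ∀ j, 1 ≤ j → j < c + 1 →
              ((dd.insert c (c + 1)).insert 1 (c + 1)).contains j = true := by
            intro j hj1 hj2
            rw [PySem.Dict.contains_insert, PySem.Dict.contains_insert]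
            simp only [Bool.or_eq_true, beq_iff_eq]
            by_cases hje : j = 1
            · exact Or.inl hje
            · by_cases hjc : j = c
              · exact Or.inr (Or.inl hjc)
              · refine Or.inr (Or.inr ?_)
                rw [hM x j]
                exact ⟨hj1, hbelow j hj1 (by omega)⟩
          by_cases hk1 : k = 1
          · rw [hk1, PySem.Dict.get?_insert_self] at hkv
            have hveq : v = c + 1 := by simpa using hkv.symm
            rw [hk1, hveq]
            exact ⟨by omega, fun j hj1 hj2 => hconts j hj1 (by omega)⟩
          · by_cases hkc : k = c
            · rw [hkc, PySem.Dict.get?_insert_of_ne _ _ (by rw [← hkc]; exact hk1),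
                PySem.Dict.get?_insert_self] at hkv
              have hveq : v = c + 1 := by simpa using hkv.symm
              rw [hkc, hveq]
              exact ⟨by omega, fun j hj1 hj2 => hconts j (by omega) (by omega)⟩
            · rw [PySem.Dict.get?_insert_of_ne _ _ hk1, PySem.Dict.get?_insert_of_ne _ _ hkc] at hkv
              obtain ⟨ha, hb2⟩ := hCc x k v hkv
              refine ⟨ha, fun j hj1 hj2 => ?_⟩
              rw [PySem.Dict.contains_insert, PySem.Dict.contains_insert]
              simp only [Bool.or_eq_true, beq_iff_eq]
              exact Or.inr (Or.inr (hb2 j hj1 hj2))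
        · rw [PySem.Dict.getD_insert_of_ne _ _ _ hb, hm2,
            PySem.Dict.getD_insert_of_ne _ _ _ hb]
          exact hCc b k v
    · have hcont : PySem.Set.contains used x = false := by
        cases hcx : PySem.Set.contains used x with
        | false => rfl
        | true => exact absurd ((hU x).mp hcx) hx
      have hstep : pvBLoop used marks acc (x :: rest)
          = pvBLoop (pvRecord used marks x).1 (pvRecord used marks x).2 (acc ++ [x]) rest := by
        simp only [pvBLoop]
        rw [if_neg (by intro hcx; rw [hcont] at hcx; simp at hcx)]
      have hstepA : pvALoop acc (x :: rest) = pvALoop (acc ++ [x]) rest := by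
        simp only [pvALoop]
        rw [if_neg hx]
      rw [hstep, hstepA]
      exact ih _ _ _ (pvINV_record acc used marks x ⟨hU, hM, hCc⟩)

-- ===== VERDICT (by name: the statement is the Claim_ definition above) =====
theorem fileNaming_spec : Claim_equal_fileNaming := by
  intro s _
  unfold Spec_fileNaming fileNaming fileNaming_alt
  refine (pvLoop_eq s [] PySem.Set.empty PySem.Dict.empty ?_).symm
  refine ⟨fun nm => by simp [PySem.Set.empty, PySem.Set.contains], ?_, ?_⟩
  · intro b k
    rw [PySem.Dict.getD_empty]
    simp [PySem.Dict.contains, PySem.Dict.empty]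
  · intro b k v
    rw [PySem.Dict.getD_empty]
    simp [PySem.Dict.get?, PySem.Dict.empty]
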